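-- pv_equiv track=rewrite | github.com/alexanh-webd/projectre | project.py | str_check
-- ===== SOURCE A (Python) =====
-- email_character_list = ['q', 'w', 'e', 'r', 't', 'y', 'u', 'i', 'o', 'p', 'a', 's', 'd', 'f', 'g',
--                             'h', 'j', 'k', 'l',
--                             'z', 'x', 'c', 'v', 'b', 'n', 'm', 'Q', 'W', 'E', 'R', 'T', 'Y', 'U', 'I',
--                             'O', 'P', 'A', 'S',
--                             'D', 'F', 'G', 'H', 'J', 'K', 'L', 'Z', 'X', 'C', 'V', 'B', 'N', 'M', '@',
--                             '.']
--
-- def str_check(e):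
--     for char in e:
--         a4 = e.find('@')
--         b4 = e.rfind('.')
--         if (char in email_character_list) and 0<a4<b4:
--             return True
--     else:
--         return False
-- ===== SOURCE B (Python) =====
-- def str_check(e):
--     return 0 < e.find('@') < e.rfind('.')
-- ===== Notes on version B (the rewrite author's own statement) =====
-- stated objective: faster
-- what changed: B drops A's per-character loop (which recomputes find/rfind on every iteration) and the allowed-character membership scan, returning a single chained comparison of the first at-sign index against the last dot index; the scan is provably redundant because whenever that comparison holds the at-sign character itself is in the allowed list.
import Mathlib
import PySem

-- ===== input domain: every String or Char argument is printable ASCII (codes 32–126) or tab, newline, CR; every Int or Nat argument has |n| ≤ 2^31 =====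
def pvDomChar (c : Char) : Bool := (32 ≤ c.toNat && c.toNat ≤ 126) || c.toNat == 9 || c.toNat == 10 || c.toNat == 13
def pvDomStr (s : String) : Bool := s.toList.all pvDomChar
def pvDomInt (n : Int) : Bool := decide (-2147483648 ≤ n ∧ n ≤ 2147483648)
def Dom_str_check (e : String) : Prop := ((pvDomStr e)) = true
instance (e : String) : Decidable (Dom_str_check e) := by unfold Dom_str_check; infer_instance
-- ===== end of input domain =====

-- B drops A's loop and allowed-character scan; it returns the chained comparison 0 < find('@') < rfind('.')

-- ===== PORT A =====
def emailCharacterList : List Char :=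
  ['q','w','e','r','t','y','u','i','o','p','a','s','d','f','g',
   'h','j','k','l','z','x','c','v','b','n','m','Q','W','E','R','T','Y','U','I',
   'O','P','A','S','D','F','G','H','J','K','L','Z','X','C','V','B','N','M','@','.']

def strCheckLoop (e : String) : List Char → Bool
  | [] => false
  | c :: rest =>
    let a4 := PySem.Str.find e "@"
    let b4 := PySem.Str.rfind e "."
    if emailCharacterList.contains c && decide (0 < a4 ∧ a4 < b4) then true
    else strCheckLoop e rest

def str_check (e : String) : Bool := strCheckLoop e e.toList

-- ===== PORT B =====
def str_check_alt (e : String) : Bool :=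
  decide (0 < PySem.Str.find e "@" ∧ PySem.Str.find e "@" < PySem.Str.rfind e ".")

-- ===== PRECONDITION & SPEC =====
def Spec_str_check (e : String) (out : Bool) : Prop := out = str_check_alt e
instance (e : String) (out : Bool) : Decidable (Spec_str_check e out) := by unfold Spec_str_check; infer_instance

-- ===== CLAIM (what is proved, stated in full; the proofs are below) =====
def Claim_equal_str_check : Prop := ∀ (e : String), Dom_str_check e → Spec_str_check e (str_check e)

-- ===== LEMMAS AND PROOFS =====

theorem pvToListAt : ("@" : String).toList = ['@'] := rfl
theorem pvToListDot : ("." : String).toList = ['.'] := rfl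

theorem strCheckLoop_false (e : String)
    (h : ¬ (0 < PySem.Str.find e "@" ∧ PySem.Str.find e "@" < PySem.Str.rfind e ".")) :
    ∀ l, strCheckLoop e l = false := by
  simp only [PySem.Str.find_eq, PySem.Str.rfind_eq, pvToListAt, pvToListDot] at h
  intro l
  induction l with
  | nil => rfl
  | cons c rest ih => simp [strCheckLoop, h, ih]

theorem strCheckLoop_true (e : String)
    (h : 0 < PySem.Str.find e "@" ∧ PySem.Str.find e "@" < PySem.Str.rfind e ".") :
    ∀ l, '@' ∈ l → strCheckLoop e l = true := by
  simp only [PySem.Str.find_eq, PySem.Str.rfind_eq, pvToListAt, pvToListDot] at h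
  intro l
  induction l with
  | nil => intro hm; cases hm
  | cons c rest ih =>
    intro hm
    by_cases hc : c ∈ emailCharacterList
    · simp [strCheckLoop, hc, h]
    · have hrest : '@' ∈ rest := by
        rcases List.mem_cons.mp hm with rfl | hm'
        · exact absurd (by decide : '@' ∈ emailCharacterList) hc
        · exact hm'
      simp [strCheckLoop, hc, ih hrest]

theorem at_mem_of_find_pos (e : String)
    (h : 0 < PySem.Str.find e "@") : '@' ∈ e.toList := by
  have hinf : ("@" : String).toList <:+: e.toList :=
    (PySem.Str.find_nonneg_iff e "@").mp (le_of_lt h)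
  have : '@' ∈ ("@" : String).toList := by decide
  exact hinf.subset this

-- ===== VERDICT (by name: the statement is the Claim_ definition above) =====
theorem str_check_spec : Claim_equal_str_check := by
  intro e _
  unfold Spec_str_check str_check str_check_alt
  by_cases h : 0 < PySem.Str.find e "@" ∧ PySem.Str.find e "@" < PySem.Str.rfind e "."
  · rw [strCheckLoop_true e h _ (at_mem_of_find_pos e h.1)]
    have h' := h
    simp only [PySem.Str.find_eq, PySem.Str.rfind_eq, pvToListAt, pvToListDot] at h'
    simp [h']
  · rw [strCheckLoop_false e h]
    have h' := h
    simp only [PySem.Str.find_eq, PySem.Str.rfind_eq, pvToListAt, pvToListDot] at h'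
    simp [h']
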